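-- pv_equiv track=rewrite | github.com/Divyanshu18-code/PABL-2CSE25-2410031690 | Internal Class Program/54_Program.py | max_visible
-- ===== SOURCE A (Python) =====
-- def max_visible(arr):
--     n = len(arr)
--     max_seen = 0
--
--     for i in range(n):
--         count = 1
--         # left
--         for j in range(i-1, -1, -1):
--             if arr[j] < arr[i]:
--                 count += 1
--             else:
--                 break
--         # right
--         for j in range(i+1, n):
--             if arr[j] < arr[i]:
--                 count += 1
--             else:
--                 break
--
--         max_seen = max(max_seen, count)
--
--     return max_seen
-- ===== SOURCE B (Python) =====
-- def max_visible(arr):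
--     def pass_counts(seq):
--         counts = []
--         stack = []  # (value, count-of-consecutive-smaller-before-it) pairs
--         for y in seq:
--             c = 0
--             while stack and stack[-1][0] < y:
--                 _, k = stack.pop()
--                 c += k + 1
--             stack.append((y, c))
--             counts.append(c)
--         return counts
--     left = pass_counts(arr)
--     right = pass_counts(arr[::-1])[::-1]
--     return max((l + r + 1 for l, r in zip(left, right)), default=0)
-- ===== Notes on version B (the rewrite author's own statement) =====
-- stated objective: faster
-- what changed: Replaced the per-element left/right linear scans by two monotonic-stack span passes (stock-span style), each element pushed/popped once, then a single max over left+right+1.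
import Mathlib
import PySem

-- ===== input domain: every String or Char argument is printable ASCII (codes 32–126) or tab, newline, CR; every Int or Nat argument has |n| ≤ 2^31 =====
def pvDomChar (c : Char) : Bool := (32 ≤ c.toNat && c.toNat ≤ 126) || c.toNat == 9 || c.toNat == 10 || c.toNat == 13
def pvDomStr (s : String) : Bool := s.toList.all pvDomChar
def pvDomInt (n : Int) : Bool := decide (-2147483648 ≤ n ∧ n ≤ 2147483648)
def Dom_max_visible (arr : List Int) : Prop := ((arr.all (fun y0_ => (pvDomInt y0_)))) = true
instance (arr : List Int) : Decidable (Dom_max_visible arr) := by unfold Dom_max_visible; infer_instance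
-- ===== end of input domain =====

-- B replaces A's per-element O(n) left/right scans by two monotonic-stack passes (O(n) total).

-- ===== PORT A =====
-- left inner loop: for j in range(i-1,-1,-1): count += 1 while arr[j] < x, else break
def aLeft (arr : List Int) (x : Int) : Nat → Int
  | 0 => 0
  | j + 1 => if arr.getD j 0 < x then aLeft arr x j + 1 else 0

-- right inner loop over the suffix arr[i+1:]: count += 1 while element < x, else break
def aRight (x : Int) : List Int → Int
  | [] => 0
  | a :: rest => if a < x then aRight x rest + 1 else 0

def max_visible (arr : List Int) : Int :=
  let n := arr.length
  (PySem.List.pyRange 0 n 1).foldl (fun maxSeen i =>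
    let x := arr.getD i.toNat 0
    let count : Int := 1 + aLeft arr x i.toNat + aRight x (arr.drop (i.toNat + 1))
    max maxSeen count) 0

-- ===== PORT B =====
-- the inner while-pop: returns (popped total of (k+1), remaining stack)
def bPop : List (Int × Int) → Int → Int × List (Int × Int)
  | [], _ => (0, [])
  | (v, k) :: s, y =>
    if v < y then
      let r := bPop s y
      (k + 1 + r.1, r.2)
    else (0, (v, k) :: s)

-- one pass of pass_counts: fold over seq with (stack, reversed counts accumulator)
def bPass : List Int → List (Int × Int) → List Int → List Int
  | [], _, acc => acc.reverse
  | y :: rest, s, acc =>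
    let r := bPop s y
    bPass rest ((y, r.1) :: r.2) (r.1 :: acc)

def max_visible_alt (arr : List Int) : Int :=
  let left := bPass arr [] []
  let right := (bPass arr.reverse [] []).reverse
  (left.zip right).foldl (fun m p => max m (p.1 + p.2 + 1)) 0

-- ===== PRECONDITION & SPEC =====
def Spec_max_visible (arr : List Int) (out : Int) : Prop := out = max_visible_alt arr
instance (arr : List Int) (out : Int) : Decidable (Spec_max_visible arr out) := by unfold Spec_max_visible; infer_instance

-- ===== CLAIM (what is proved, stated in full; the proofs are below) =====
def Claim_equal_max_visible : Prop := ∀ (arr : List Int), Dom_max_visible arr → Spec_max_visible arr (max_visible arr)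

-- ===== LEMMAS AND PROOFS =====

-- length of the strictly-smaller-than-x prefix, as an Int
def ltw (x : Int) (l : List Int) : Int := ((l.takeWhile (fun a => decide (a < x))).length : Int)

theorem ltw_cons (x a : Int) (l : List Int) :
    ltw x (a :: l) = if a < x then ltw x l + 1 else 0 := by
  simp only [ltw, List.takeWhile]
  by_cases h : a < x <;> simp [h]

-- key amortization lemma: popping for y then for x ≥ y pops exactly what popping for x pops
theorem bPop_split (s : List (Int × Int)) (x y : Int) (hyx : y ≤ x) :
    (bPop s y).1 + (bPop (bPop s y).2 x).1 = (bPop s x).1 := by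
  induction s with
  | nil => simp [bPop]
  | cons p s ih =>
    obtain ⟨v, k⟩ := p
    by_cases hv : v < y
    · have hvx : v < x := lt_of_lt_of_le hv hyx
      simp only [bPop, if_pos hv, if_pos hvx]
      omega
    · simp only [bPop, if_neg hv]
      simp

-- counts that pass_counts must produce, relative to the already-processed prefix pre
def leftsFrom (pre : List Int) : List Int → List Int
  | [] => []
  | y :: rest => ltw y pre.reverse :: leftsFrom (pre ++ [y]) rest

theorem bPass_eq_leftsFrom (rest : List Int) :
    ∀ (pre : List Int) (s : List (Int × Int)) (acc : List Int),
    (∀ x, (bPop s x).1 = ltw x pre.reverse) →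
    bPass rest s acc = acc.reverse ++ leftsFrom pre rest := by
  induction rest with
  | nil => intro pre s acc _; simp [bPass, leftsFrom]
  | cons y rest ih =>
    intro pre s acc hinv
    simp only [bPass, leftsFrom]
    have hc : (bPop s y).1 = ltw y pre.reverse := hinv y
    have hinv' : ∀ x, (bPop ((y, (bPop s y).1) :: (bPop s y).2) x).1 = ltw x (pre ++ [y]).reverse := by
      intro x
      simp only [List.reverse_append, List.reverse_cons, List.reverse_nil, List.nil_append,
        List.singleton_append, ltw_cons]
      by_cases hyx : y < x
      · simp only [bPop, if_pos hyx]
        have := bPop_split s x y (le_of_lt hyx)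
        rw [← hinv x]; omega
      · simp [bPop, if_neg hyx]
    rw [ih (pre ++ [y]) _ _ hinv', hc]
    simp

theorem bPass_spec (l : List Int) : bPass l [] [] = leftsFrom [] l := by
  have := bPass_eq_leftsFrom l [] [] [] (by intro x; simp [bPop, ltw])
  simpa using this

theorem leftsFrom_length (rest : List Int) : ∀ pre, (leftsFrom pre rest).length = rest.length := by
  induction rest with
  | nil => intro pre; rfl
  | cons y r ih => intro pre; simp [leftsFrom, ih]

theorem leftsFrom_getElem (rest : List Int) :
    ∀ (pre : List Int) (i : Nat) (h : i < rest.length),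
    (leftsFrom pre rest)[i]'(by rw [leftsFrom_length]; exact h)
      = ltw (rest[i]'h) ((pre ++ rest.take i).reverse) := by
  induction rest with
  | nil => intro pre i h; exact absurd h (by simp)
  | cons y r ih =>
    intro pre i h
    match i with
    | 0 => simp [leftsFrom]
    | i + 1 =>
      simp only [leftsFrom, List.getElem_cons_succ, List.take_succ_cons]
      rw [ih (pre ++ [y]) i (by simpa using h)]
      simp

-- A's left scan is the takeWhile length over the reversed prefix
theorem aLeft_eq (arr : List Int) (x : Int) (i : Nat) (h : i ≤ arr.length) :
    aLeft arr x i = ltw x ((arr.take i).reverse) := by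
  induction i with
  | zero => simp [aLeft, ltw]
  | succ j ihj =>
    have hj : j < arr.length := lt_of_lt_of_le (Nat.lt_succ_self j) h
    have htake : arr.take (j + 1) = arr.take j ++ [arr[j]] := by
      rw [List.take_add_one]
      simp [List.getElem?_eq_getElem hj]
    rw [aLeft, htake, List.reverse_append]
    simp only [List.reverse_cons, List.reverse_nil, List.nil_append, List.singleton_append, ltw_cons]
    rw [List.getD_eq_getElem arr 0 hj]
    by_cases hv : arr[j] < x
    · simp [hv, ihj (le_of_lt hj)]
    · simp [hv]

theorem aRight_eq (x : Int) (l : List Int) : aRight x l = ltw x l := by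
  induction l with
  | nil => rfl
  | cons a r ih => rw [aRight, ltw_cons]; split_ifs with h <;> simp [ih]

-- the common value both programs maximize over
def cnt (arr : List Int) (i : Nat) : Int :=
  ltw (arr.getD i 0) ((arr.take i).reverse) + ltw (arr.getD i 0) (arr.drop (i + 1)) + 1

theorem max_visible_eq_fold (arr : List Int) :
    max_visible arr = (List.range arr.length).foldl (fun m i => max m (cnt arr i)) 0 := by
  simp only [max_visible, PySem.List.pyRange_one, sub_zero, Int.toNat_natCast, List.foldl_map]
  apply PySem.List.foldl_congr_mem
  intro acc i hi
  have hi' : i < arr.length := List.mem_range.mp hi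
  simp only [zero_add, Int.toNat_natCast]
  rw [aLeft_eq arr _ i (le_of_lt hi'), aRight_eq]
  unfold cnt
  ring_nf

-- B's right list, element-wise
theorem rights_getElem (arr : List Int) (i : Nat) (h : i < arr.length) :
    ((bPass arr.reverse [] []).reverse)[i]'(by
        rw [List.length_reverse, bPass_spec, leftsFrom_length, List.length_reverse]; exact h)
      = ltw (arr[i]'h) (arr.drop (i + 1)) := by
  have hlen : (bPass arr.reverse [] []).length = arr.length := by
    rw [bPass_spec, leftsFrom_length, List.length_reverse]
  rw [List.getElem_reverse]
  have hk : (bPass arr.reverse [] []).length - 1 - i < arr.reverse.length := by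
    rw [hlen, List.length_reverse]; omega
  rw [List.getElem_of_eq (bPass_spec arr.reverse),
      leftsFrom_getElem arr.reverse [] _ (by simpa using hk)]
  have h1 : arr.reverse[(bPass arr.reverse [] []).length - 1 - i]'hk = arr[i]'h := by
    rw [List.getElem_reverse]
    congr 1
    omega
  rw [h1]
  congr 1
  rw [List.nil_append, List.reverse_take]
  simp only [List.reverse_reverse, List.length_reverse]
  congr 1
  rw [hlen]
  omega

theorem lefts_getElem (arr : List Int) (i : Nat) (h : i < arr.length) :
    (bPass arr [] [])[i]'(by rw [bPass_spec, leftsFrom_length]; exact h)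
      = ltw (arr[i]'h) ((arr.take i).reverse) := by
  rw [List.getElem_of_eq (bPass_spec arr), leftsFrom_getElem arr [] i h]
  simp

theorem max_visible_alt_eq_fold (arr : List Int) :
    max_visible_alt arr = (List.range arr.length).foldl (fun m i => max m (cnt arr i)) 0 := by
  have hll : (bPass arr [] []).length = arr.length := by
    rw [bPass_spec, leftsFrom_length]
  have hrl : ((bPass arr.reverse [] []).reverse).length = arr.length := by
    rw [List.length_reverse, bPass_spec, leftsFrom_length, List.length_reverse]
  have hzip : (bPass arr [] []).zip ((bPass arr.reverse [] []).reverse)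
      = (List.range arr.length).map (fun i =>
          (ltw (arr.getD i 0) ((arr.take i).reverse), ltw (arr.getD i 0) (arr.drop (i + 1)))) := by
    apply List.ext_getElem
    · simp [hll, hrl]
    · intro i h1 h2
      have hi : i < arr.length := by simpa [hll, hrl] using h1
      rw [List.getElem_zip, List.getElem_map, List.getElem_range,
          lefts_getElem arr i hi, rights_getElem arr i hi,
          List.getD_eq_getElem arr 0 hi]
  simp only [max_visible_alt, hzip, List.foldl_map]
  apply PySem.List.foldl_congr_mem
  intro acc i hi
  rfl
-- ===== VERDICT (by name: the statement is the Claim_ definition above) =====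
theorem max_visible_spec : Claim_equal_max_visible := by
  intro arr _
  unfold Spec_max_visible
  rw [max_visible_eq_fold, max_visible_alt_eq_fold]
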